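-- pv_equiv track=rewrite | github.com/jackpetrillo/local-reassembly | likelihood.py | variant_regions
-- ===== SOURCE A (Python) =====
-- def variant_regions(path_kmers, path_scores):
--     """
--     Returns two arrays, where each indices corresponds to a start index and end index
--     for potential variant sites.
--     """
--     var_starts = []
--     var_ends = []
--
--     run = False
--
--     for i in range(len(path_kmers)):
--         if(run == False and len(path_kmers[i]) > 1):
--             run = True
--             var_starts.append(i)
--
--         if(run == True and len(path_kmers[i]) == 1):
--             var_ends.append(i)
--             run = False
--
--         if(run == True and i == len(path_kmers) - 1):
--             var_ends.append(i)
--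
--
--     return var_starts, var_ends
-- ===== SOURCE B (Python) =====
-- def variant_regions(path_kmers, path_scores):
--     """
--     Returns two arrays, where each indices corresponds to a start index and end index
--     for potential variant sites.
--     """
--     n = len(path_kmers)
--     starts = []
--     ends = []
--     i = 0
--     while i < n:
--         if len(path_kmers[i]) > 1:
--             starts.append(i)
--             j = i + 1
--             while j < n and len(path_kmers[j]) != 1:
--                 j += 1
--             ends.append(min(j, n - 1))
--             i = j + 1
--         else:
--             i += 1
--     return starts, ends
-- ===== Notes on version B (the rewrite author's own statement) =====
-- stated objective: alternative
-- what changed: Replaces A's single pass with a boolean run flag by a run-jumping two-level scan: an outer loop finds each run start (len>1) and an inner loop jumps ahead to the run's terminator (first len==1 index or the list end), emitting start/end pairs per run instead of per-element flag updates.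
import Mathlib
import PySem

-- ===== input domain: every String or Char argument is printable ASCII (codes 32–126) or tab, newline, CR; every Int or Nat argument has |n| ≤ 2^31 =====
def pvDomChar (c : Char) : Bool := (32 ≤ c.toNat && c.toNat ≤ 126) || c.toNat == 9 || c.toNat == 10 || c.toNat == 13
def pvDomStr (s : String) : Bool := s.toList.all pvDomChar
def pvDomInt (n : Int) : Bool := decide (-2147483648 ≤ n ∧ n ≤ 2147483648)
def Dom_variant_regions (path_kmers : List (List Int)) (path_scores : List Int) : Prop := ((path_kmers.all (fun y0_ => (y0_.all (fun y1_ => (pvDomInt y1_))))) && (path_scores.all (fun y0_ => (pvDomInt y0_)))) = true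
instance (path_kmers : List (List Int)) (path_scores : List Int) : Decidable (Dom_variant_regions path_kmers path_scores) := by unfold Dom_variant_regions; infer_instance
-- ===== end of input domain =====

-- B replaces A's per-index boolean run flag with a run-jumping scan (outer loop finds a
-- run start, inner loop jumps to its end); objective: alternative decomposition, same cost.

-- ===== PORT A =====
-- one iteration of A's for-loop body (state = (run, var_starts, var_ends))
def vrStep (path_kmers : List (List Int)) (n : Int) (st : Bool × List Int × List Int) (i : Int) : Bool × List Int × List Int :=
  let k := PySem.List.pyGetD path_kmers i []
  let run := st.1
  let vs := st.2.1
  let ve := st.2.2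
  let rv := if run = false ∧ 1 < k.length then (true, vs ++ [i]) else (run, vs)
  let run := rv.1
  let vs := rv.2
  let re := if run = true ∧ k.length = 1 then (false, ve ++ [i]) else (run, ve)
  let run := re.1
  let ve := re.2
  let ve := if run = true ∧ i = n - 1 then ve ++ [i] else ve
  (run, vs, ve)

def variant_regions (path_kmers : List (List Int)) (path_scores : List Int) : List Int × List Int :=
  let n : Int := path_kmers.length
  let st := (PySem.List.pyRange 0 n 1).foldl (vrStep path_kmers n) (false, [], [])
  (st.2.1, st.2.2)

-- ===== PORT B =====
-- inner while loop of Source B: first index j' ≥ j below n with len(path_kmers[j']) ≠ 1 (or n)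
def vrFind (path_kmers : List (List Int)) (n j : Nat) : Nat :=
  if j < n then
    (if (path_kmers.getD j []).length ≠ 1 then vrFind path_kmers n (j + 1) else j)
  else j
termination_by n - j
decreasing_by omega

-- needed by vrLoop's termination proof (cited in its decreasing_by)
theorem vrFind_ge (path_kmers : List (List Int)) (n : Nat) : ∀ (k j : Nat), n - j ≤ k → j ≤ vrFind path_kmers n j := by
  intro k
  induction k with
  | zero =>
      intro j h
      rw [vrFind]
      have : ¬ j < n := by omega
      simp [this]
  | succ k ih =>
      intro j h
      rw [vrFind]
      split_ifs with h1 h2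
      · exact le_trans (Nat.le_succ j) (ih (j + 1) (by omega))
      · exact le_rfl
      · exact le_rfl

-- outer while loop of Source B
def vrLoop (path_kmers : List (List Int)) (n i : Nat) (starts ends : List Int) : List Int × List Int :=
  if i < n then
    (if 1 < (path_kmers.getD i []).length then
      let j := vrFind path_kmers n (i + 1)
      vrLoop path_kmers n (j + 1) (starts ++ [(i : Int)]) (ends ++ [min (j : Int) ((n : Int) - 1)])
    else
      vrLoop path_kmers n (i + 1) starts ends)
  else (starts, ends)
termination_by n - i
decreasing_by
  · have := vrFind_ge path_kmers n (n - (i + 1)) (i + 1) le_rfl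
    omega
  · omega

def variant_regions_alt (path_kmers : List (List Int)) (path_scores : List Int) : List Int × List Int :=
  vrLoop path_kmers path_kmers.length 0 [] []

-- ===== PRECONDITION & SPEC =====
def Spec_variant_regions (path_kmers : List (List Int)) (path_scores : List Int) (out : List Int × List Int) : Prop := out = variant_regions_alt path_kmers path_scores
instance (path_kmers : List (List Int)) (path_scores : List Int) (out : List Int × List Int) : Decidable (Spec_variant_regions path_kmers path_scores out) := by unfold Spec_variant_regions; infer_instance

-- ===== CLAIM (what is proved, stated in full; the proofs are below) =====
def Claim_equal_variant_regions : Prop := ∀ (path_kmers : List (List Int)) (path_scores : List Int), Dom_variant_regions path_kmers path_scores → Spec_variant_regions path_kmers path_scores (variant_regions path_kmers path_scores)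

-- ===== LEMMAS AND PROOFS =====

-- evaluation of one iteration of A's loop body in each of the four states it distinguishes
theorem vrStep_start (pk : List (List Int)) (n i : Int) (vs ve : List Int)
    (h : 1 < (PySem.List.pyGetD pk i []).length) :
    vrStep pk n (false, vs, ve) i = (true, vs ++ [i], if i = n - 1 then ve ++ [i] else ve) := by
  have h1 : ¬ (PySem.List.pyGetD pk i []).length = 1 := by omega
  simp [vrStep, h, h1]

theorem vrStep_skip (pk : List (List Int)) (n i : Int) (vs ve : List Int)
    (h : ¬ 1 < (PySem.List.pyGetD pk i []).length) :
    vrStep pk n (false, vs, ve) i = (false, vs, ve) := by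
  simp [vrStep, h]

theorem vrStep_end (pk : List (List Int)) (n i : Int) (vs ve : List Int)
    (h : (PySem.List.pyGetD pk i []).length = 1) :
    vrStep pk n (true, vs, ve) i = (false, vs, ve ++ [i]) := by
  simp [vrStep, h]

theorem vrStep_cont (pk : List (List Int)) (n i : Int) (vs ve : List Int)
    (h : ¬ (PySem.List.pyGetD pk i []).length = 1) :
    vrStep pk n (true, vs, ve) i = (true, vs, if i = n - 1 then ve ++ [i] else ve) := by
  simp [vrStep, h]

-- main invariant: A's fold over indices [i, n) started with run = false computes vrLoop from i,
-- and started with run = true computes the pending run's end (vrFind) and then continues.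
theorem vr_main (pk : List (List Int)) :
    ∀ (k i : Nat) (vs ve : List Int), pk.length - i ≤ k →
      ((((List.range' i (pk.length - i)).map (Nat.cast : Nat → Int)).foldl (vrStep pk (pk.length : Int)) (false, vs, ve)).2
          = vrLoop pk pk.length i vs ve)
      ∧ ((((List.range' i (pk.length - i)).map (Nat.cast : Nat → Int)).foldl (vrStep pk (pk.length : Int)) (true, vs, ve)).2
          = if i < pk.length then
              vrLoop pk pk.length (vrFind pk pk.length i + 1) vs
                (ve ++ [min ((vrFind pk pk.length i : Nat) : Int) ((pk.length : Int) - 1)])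
            else (vs, ve)) := by
  intro k
  induction k with
  | zero =>
      intro i vs ve h
      have hn : ¬ i < pk.length := by omega
      have h0 : pk.length - i = 0 := by omega
      rw [h0]
      constructor
      · rw [vrLoop]; simp [hn]
      · simp [hn]
  | succ k ih =>
      intro i vs ve h
      by_cases hi : i < pk.length
      · have hrange : pk.length - i = (pk.length - (i + 1)) + 1 := by omega
        rw [hrange, List.range'_succ, List.map_cons, List.foldl_cons, List.foldl_cons]
        have hget : PySem.List.pyGetD pk (i : Int) [] = pk.getD i [] := PySem.List.pyGetD_natCast pk i []
        constructor
        · -- run = false entering index i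
          by_cases hK : 1 < (PySem.List.pyGetD pk (i : Int) []).length
          · have hK' : 1 < (pk.getD i []).length := hget ▸ hK
            rw [vrStep_start pk _ _ vs ve hK]
            by_cases hlast : i + 1 = pk.length
            · have hci : (i : Int) = (pk.length : Int) - 1 := by omega
              rw [if_pos hci]
              have h0 : pk.length - (i + 1) = 0 := by omega
              rw [h0, List.range'_zero, List.map_nil, List.foldl_nil]
              have hfind : vrFind pk pk.length (i + 1) = pk.length := by
                rw [vrFind, if_neg (show ¬ i + 1 < pk.length by omega)]; omega
              conv_rhs => rw [vrLoop]
              rw [if_pos hi, if_pos hK']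
              simp only [hfind]
              conv_rhs => rw [vrLoop]
              rw [if_neg (show ¬ pk.length + 1 < pk.length by omega)]
              have hmin : min ((pk.length : Int)) ((pk.length : Int) - 1) = (i : Int) := by omega
              rw [hmin]
            · have hci : ¬ (i : Int) = (pk.length : Int) - 1 := by intro hc; omega
              rw [if_neg hci]
              rw [(ih (i + 1) (vs ++ [(i : Int)]) ve (by omega)).2]
              rw [if_pos (show i + 1 < pk.length by omega)]
              conv_rhs => rw [vrLoop]
              rw [if_pos hi, if_pos hK']
          · have hK' : ¬ 1 < (pk.getD i []).length := hget ▸ hK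
            rw [vrStep_skip pk _ _ vs ve hK]
            rw [(ih (i + 1) vs ve (by omega)).1]
            conv_rhs => rw [vrLoop]
            rw [if_pos hi, if_neg hK']
        · -- run = true entering index i
          rw [if_pos hi]
          by_cases hK1 : (PySem.List.pyGetD pk (i : Int) []).length = 1
          · have hK1' : (pk.getD i []).length = 1 := hget ▸ hK1
            rw [vrStep_end pk _ _ vs ve hK1]
            rw [(ih (i + 1) vs (ve ++ [(i : Int)]) (by omega)).1]
            have hfind : vrFind pk pk.length i = i := by
              rw [vrFind, if_pos hi, if_neg (not_not_intro hK1')]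
            rw [hfind]
            have hmin : min ((i : Int)) ((pk.length : Int) - 1) = (i : Int) := by omega
            rw [hmin]
          · have hK1' : ¬ (pk.getD i []).length = 1 := hget ▸ hK1
            rw [vrStep_cont pk _ _ vs ve hK1]
            have hfind : vrFind pk pk.length i = vrFind pk pk.length (i + 1) := by
              rw [vrFind, if_pos hi, if_pos hK1']
            by_cases hlast : i + 1 = pk.length
            · have hci : (i : Int) = (pk.length : Int) - 1 := by omega
              rw [if_pos hci]
              have h0 : pk.length - (i + 1) = 0 := by omega
              rw [h0, List.range'_zero, List.map_nil, List.foldl_nil]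
              have hfind2 : vrFind pk pk.length (i + 1) = pk.length := by
                rw [vrFind, if_neg (show ¬ i + 1 < pk.length by omega)]; omega
              rw [hfind, hfind2]
              conv_rhs => rw [vrLoop]
              rw [if_neg (show ¬ pk.length + 1 < pk.length by omega)]
              have hmin : min ((pk.length : Int)) ((pk.length : Int) - 1) = (i : Int) := by omega
              rw [hmin]
            · have hci : ¬ (i : Int) = (pk.length : Int) - 1 := by intro hc; omega
              rw [if_neg hci]
              rw [(ih (i + 1) vs ve (by omega)).2]
              rw [if_pos (show i + 1 < pk.length by omega), hfind]
      · have h0 : pk.length - i = 0 := by omega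
        rw [h0]
        constructor
        · rw [vrLoop]; simp [hi]
        · simp [hi]

-- ===== VERDICT (by name: the statement is the Claim_ definition above) =====
theorem variant_regions_spec : Claim_equal_variant_regions := by
  intro pk ps _
  unfold Spec_variant_regions variant_regions variant_regions_alt
  have h := (vr_main pk pk.length 0 [] [] (by omega)).1
  simp only [Nat.sub_zero] at h
  show (((PySem.List.pyRange 0 (pk.length : Int) 1).foldl (vrStep pk (pk.length : Int)) (false, [], [])).2.1,
        ((PySem.List.pyRange 0 (pk.length : Int) 1).foldl (vrStep pk (pk.length : Int)) (false, [], [])).2.2)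
      = vrLoop pk pk.length 0 [] []
  rw [PySem.List.pyRange_zero_natCast, List.range_eq_range']
  rw [← h]
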